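-- pv_equiv track=rewrite | github.com/pypi-data/pypi-mirror-92 | packages/hangul-korean/hangul-korean-1.0rc2.tar.gz/hangul-korean-1.0rc2/hangul/tokenizer.py | cutintopieces
-- ===== SOURCE A (Python) =====
-- def cutintopieces(kul, lnth):
--     ans = [0]
--     last = 0
--     j = 1
--     kullen = len(kul)
--     for i in range(0, kullen):
--         if kul[i] == ' ':
--             if i > j * lnth - 1:
--                 if ans[-1] != last:
--                     ans.append(last)
--                 j += 1
--             last = i
--     if i > j * lnth - 1:
--         ans.append(last)
--     ans.append(kullen)
--     return ans
-- ===== SOURCE B (Python) =====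
-- def cutintopieces(kul, lnth):
--     # Different algorithm: collect space positions once, then an outer loop per
--     # CUT that binary-searches the sorted space list for the first space at or
--     # beyond the current threshold j*lnth, instead of A's per-character scan.
--     n = len(kul)
--     spaces = [i for i, c in enumerate(kul) if c == ' ']
--     m = len(spaces)
--     ans = [0]
--     last = 0
--     j = 1
--     pos = 0
--     while pos < m:
--         t = j * lnth
--         # first index k in [pos, m) with spaces[k] >= t  (binary search)
--         lo, hi = pos, m
--         while lo < hi:
--             mid = (lo + hi) // 2
--             if spaces[mid] >= t:
--                 hi = mid
--             else:
--                 lo = mid + 1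
--         k = lo
--         if k > pos:
--             last = spaces[k - 1]
--         if k == m:
--             break
--         if ans[-1] != last:
--             ans.append(last)
--         j += 1
--         last = spaces[k]
--         pos = k + 1
--     if n - 1 > j * lnth - 1:
--         ans.append(last)
--     ans.append(n)
--     return ans
-- ===== Notes on version B (the rewrite author's own statement) =====
-- stated objective: alternative
-- what changed: B collects the sorted space positions once and then runs an outer loop per CUT, binary-searching that list for the first space at or beyond the current threshold j*lnth and jumping there, instead of A's single per-character scan that tests every space against the threshold; Pre_ excludes the empty string, on which A raises NameError (loop variable i never bound) while B returns normally.
-- outside the precondition, e.g. on cutintopieces('', 3): A raises NameError, B returns [0, 0]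
import Mathlib
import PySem

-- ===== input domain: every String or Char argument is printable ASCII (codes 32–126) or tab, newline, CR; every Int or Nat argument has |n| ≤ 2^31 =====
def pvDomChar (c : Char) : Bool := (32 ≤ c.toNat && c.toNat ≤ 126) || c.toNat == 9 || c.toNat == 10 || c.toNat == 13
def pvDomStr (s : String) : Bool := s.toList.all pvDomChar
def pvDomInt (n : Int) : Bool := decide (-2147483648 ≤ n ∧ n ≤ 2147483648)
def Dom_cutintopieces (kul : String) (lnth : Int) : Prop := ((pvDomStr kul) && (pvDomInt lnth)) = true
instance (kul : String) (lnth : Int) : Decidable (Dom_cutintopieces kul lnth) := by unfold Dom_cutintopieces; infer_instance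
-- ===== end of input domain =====

-- B replaces A's per-character scan by a per-cut outer loop that binary-searches the sorted
-- list of space positions for the first space at or beyond each threshold (objective: alternative).

-- ===== PORT A =====
-- single scan over every character; after the loop, Python's i equals len(kul)-1
-- (valid since Pre_ requires kul nonempty; on "" Python A raises NameError).
def cutintopieces (kul : String) (lnth : Int) : List Int :=
  let kullen : Int := (kul.toList.length : Int)
  let st := (PySem.List.enumerate kul.toList 0).foldl
    (fun (st : List Int × Int × Int) (p : Int × Char) =>
      if p.2 == ' ' then
        let (ans, last, j) := st
        if p.1 > j * lnth - 1 then
          (if ans.getLast? != some last then ans ++ [last] else ans, p.1, j + 1)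
        else
          (ans, p.1, j)
      else st)
    ([0], 0, 1)
  let (ans, last, j) := st
  let ans := if kullen - 1 > j * lnth - 1 then ans ++ [last] else ans
  ans ++ [kullen]

-- ===== PORT B =====
-- binary search: first index k in [lo, hi) with spaces[k] >= t; fuel (>= hi - lo when
-- called) is only a structural totality guard for Source B's while-loop.
-- Python's spaces[mid] is always in range here, so List.getD is exact.
def pvBsearch (spaces : List Int) (t : Int) : Nat → Nat → Nat → Nat
  | 0, lo, _ => lo
  | fuel + 1, lo, hi =>
    if lo < hi then
      if spaces.getD ((lo + hi) / 2) 0 ≥ t then pvBsearch spaces t fuel lo ((lo + hi) / 2)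
      else pvBsearch spaces t fuel ((lo + hi) / 2 + 1) hi
    else lo

-- the while-loop of Source B: state (pos, ans, last, j), one iteration per cut;
-- fuel (>= spaces.length - pos when called) is only a structural totality guard.
def pvCutLoop (spaces : List Int) (lnth : Int) :
    Nat → Nat → List Int → Int → Int → List Int × Int × Int
  | 0, _, ans, last, j => (ans, last, j)
  | fuel + 1, pos, ans, last, j =>
    if pos < spaces.length then
      let t := j * lnth
      let k := pvBsearch spaces t spaces.length pos spaces.length
      let last1 := if k > pos then spaces.getD (k - 1) 0 else last
      if k = spaces.length then (ans, last1, j)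
      else
        pvCutLoop spaces lnth fuel (k + 1)
          (if ans.getLast? != some last1 then ans ++ [last1] else ans)
          (spaces.getD k 0) (j + 1)
    else (ans, last, j)

def cutintopieces_alt (kul : String) (lnth : Int) : List Int :=
  let n : Int := (kul.toList.length : Int)
  let spaces : List Int :=
    ((PySem.List.enumerate kul.toList 0).filter (fun p => p.2 == ' ')).map (fun p => p.1)
  let st := pvCutLoop spaces lnth spaces.length 0 [0] 0 1
  let (ans, last, j) := st
  let ans := if n - 1 > j * lnth - 1 then ans ++ [last] else ans
  ans ++ [n]

-- ===== PRECONDITION & SPEC =====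
-- Pre_ excludes the empty string, on which Python A raises NameError (loop variable i unbound).
def Pre_cutintopieces (kul : String) (lnth : Int) : Prop := kul ≠ ""
instance (kul : String) (lnth : Int) : Decidable (Pre_cutintopieces kul lnth) := by unfold Pre_cutintopieces; infer_instance
def pvWitness_cutintopieces : String × Int := ("ab cd ef", 3)

def Spec_cutintopieces (kul : String) (lnth : Int) (out : List Int) : Prop := out = cutintopieces_alt kul lnth
instance (kul : String) (lnth : Int) (out : List Int) : Decidable (Spec_cutintopieces kul lnth out) := by unfold Spec_cutintopieces; infer_instance

-- ===== CLAIM (what is proved, stated in full; the proofs are below) =====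
def Claim_equal_cutintopieces : Prop := ∀ (kul : String) (lnth : Int), Dom_cutintopieces kul lnth → Pre_cutintopieces kul lnth → Spec_cutintopieces kul lnth (cutintopieces kul lnth)

-- ===== LEMMAS AND PROOFS =====

-- the per-space step both programs implement
def pvStep (lnth : Int) (st : List Int × Int × Int) (s : Int) : List Int × Int × Int :=
  let (ans, last, j) := st
  if s > j * lnth - 1 then
    (if ans.getLast? != some last then ans ++ [last] else ans, s, j + 1)
  else
    (ans, s, j)

-- A's character fold equals the fold of pvStep over the space positions
theorem cutintopieces_fold_eq (kul : String) (lnth : Int) :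
    (PySem.List.enumerate kul.toList 0).foldl
      (fun (st : List Int × Int × Int) (p : Int × Char) =>
        if p.2 == ' ' then
          let (ans, last, j) := st
          if p.1 > j * lnth - 1 then
            (if ans.getLast? != some last then ans ++ [last] else ans, p.1, j + 1)
          else
            (ans, p.1, j)
        else st)
      ([0], 0, 1)
    = (((PySem.List.enumerate kul.toList 0).filter (fun p => p.2 == ' ')).map (fun p => p.1)).foldl
        (pvStep lnth) ([0], 0, 1) := by
  rw [List.foldl_map,
      ← PySem.List.foldl_if_eq_foldl_filter (p := fun (p : Int × Char) => p.2 == ' ')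
        (f := fun st (p : Int × Char) => pvStep lnth st p.1)]
  rfl

-- monotonicity of a strictly sorted list, through getD
theorem pv_sorted_getD_le (l : List Int) (h : l.Pairwise (· < ·)) (i j : Nat)
    (hij : i ≤ j) (hj : j < l.length) : l.getD i 0 ≤ l.getD j 0 := by
  rw [List.getD_eq_getElem l 0 (by omega), List.getD_eq_getElem l 0 hj]
  rcases Nat.lt_or_ge i j with hlt | hge
  · exact le_of_lt (List.pairwise_iff_getElem.mp h i j (by omega) hj hlt)
  · have : i = j := by omega
    subst this; exact le_refl _

theorem pvBsearch_ge (spaces : List Int) (t : Int) :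
    ∀ (fuel lo hi : Nat), lo ≤ pvBsearch spaces t fuel lo hi := by
  intro fuel
  induction fuel with
  | zero => intro lo hi; exact Nat.le_refl lo
  | succ fuel ih =>
    intro lo hi
    rw [pvBsearch]
    by_cases hlh : lo < hi
    · rw [if_pos hlh]
      by_cases hm : spaces.getD ((lo + hi) / 2) 0 ≥ t
      · rw [if_pos hm]; exact ih lo ((lo + hi) / 2)
      · rw [if_neg hm]
        have := ih ((lo + hi) / 2 + 1) hi
        omega
    · rw [if_neg hlh]

-- pvBsearch spec: everything in [lo, k) is < t, and spaces[k] ≥ t if k < hi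
theorem pvBsearch_spec (spaces : List Int) (t : Int) (hs : spaces.Pairwise (· < ·)) :
    ∀ (fuel lo hi : Nat), hi - lo ≤ fuel → lo ≤ hi → hi ≤ spaces.length →
      (pvBsearch spaces t fuel lo hi ≤ hi) ∧
      (∀ i, lo ≤ i → i < pvBsearch spaces t fuel lo hi → i < spaces.length →
        spaces.getD i 0 < t) ∧
      (pvBsearch spaces t fuel lo hi < hi → t ≤ spaces.getD (pvBsearch spaces t fuel lo hi) 0) := by
  intro fuel
  induction fuel with
  | zero =>
    intro lo hi hf hlo hhi
    have : lo = hi := by omega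
    rw [pvBsearch]
    exact ⟨by omega, by omega, by omega⟩
  | succ fuel ih =>
    intro lo hi hf hlo hhi
    rw [pvBsearch]
    by_cases hlh : lo < hi
    · rw [if_pos hlh]
      by_cases hm : spaces.getD ((lo + hi) / 2) 0 ≥ t
      · rw [if_pos hm]
        obtain ⟨h1, h2, h3⟩ := ih lo ((lo + hi) / 2) (by omega) (by omega) (by omega)
        refine ⟨by omega, h2, ?_⟩
        intro hk
        rcases Nat.lt_or_ge (pvBsearch spaces t fuel lo ((lo + hi) / 2)) ((lo + hi) / 2)
          with hlt | hge
        · exact h3 hlt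
        · have heq : pvBsearch spaces t fuel lo ((lo + hi) / 2) = (lo + hi) / 2 := by omega
          rw [heq]; exact hm
      · rw [if_neg hm]
        obtain ⟨h1, h2, h3⟩ := ih ((lo + hi) / 2 + 1) hi (by omega) (by omega) hhi
        refine ⟨h1, ?_, h3⟩
        intro i hi1 hi2 hi3
        rcases Nat.lt_or_ge ((lo + hi) / 2) i with hlt | hge
        · exact h2 i (by omega) hi2 hi3
        · calc spaces.getD i 0 ≤ spaces.getD ((lo + hi) / 2) 0 :=
                pv_sorted_getD_le spaces hs i ((lo + hi) / 2) hge (by omega)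
            _ < t := by omega
    · rw [if_neg hlh]
      exact ⟨by omega, by omega, by omega⟩

-- skipped spaces (all below the threshold) only update `last`
theorem pv_foldl_skip (lnth j : Int) :
    ∀ (xs : List Int) (ans : List Int) (last : Int),
      (∀ x ∈ xs, x < j * lnth) →
      xs.foldl (pvStep lnth) (ans, last, j) = (ans, xs.getLastD last, j) := by
  intro xs
  induction xs with
  | nil => intro ans last _; rfl
  | cons x xs ih =>
    intro ans last hall
    have hx : x < j * lnth := hall x (List.mem_cons_self)
    have : pvStep lnth (ans, last, j) x = (ans, x, j) := by
      simp only [pvStep]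
      rw [if_neg (by omega)]
    rw [List.foldl_cons, this, ih ans x (fun y hy => hall y (List.mem_cons_of_mem _ hy)),
        List.getLastD_cons]

-- the binary-search loop computes the same state as the fold over the space suffix
theorem pvCutLoop_eq_foldl (spaces : List Int) (lnth : Int) (hs : spaces.Pairwise (· < ·)) :
    ∀ (fuel pos : Nat) (ans : List Int) (last j : Int), spaces.length - pos ≤ fuel →
      pvCutLoop spaces lnth fuel pos ans last j
        = (spaces.drop pos).foldl (pvStep lnth) (ans, last, j) := by
  intro fuel
  induction fuel with
  | zero =>
    intro pos ans last j hN
    rw [pvCutLoop, List.drop_of_length_le (by omega)]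
    rfl
  | succ fuel ih =>
    intro pos ans last j hN
    by_cases hp : pos < spaces.length
    · rw [pvCutLoop, if_pos hp]
      simp only []
      obtain ⟨hk1, hk2, hk3⟩ :=
        pvBsearch_spec spaces (j * lnth) hs spaces.length pos spaces.length
          (by omega) (by omega) (le_refl _)
      set k := pvBsearch spaces (j * lnth) spaces.length pos spaces.length with hkdef
      have hkp : pos ≤ k := pvBsearch_ge spaces (j * lnth) spaces.length pos spaces.length
      set seg := (spaces.drop pos).take (k - pos) with hseg
      have hlen : seg.length = k - pos := by
        rw [hseg, List.length_take, List.length_drop]; omega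
      -- each element of the skipped segment, through getElem?
      have hgetD : ∀ i : Nat, i < k - pos → seg[i]? = some (spaces.getD (pos + i) 0) := by
        intro i hi
        rw [hseg, List.getElem?_take_of_lt hi, List.getElem?_drop,
            List.getElem?_eq_getElem (show pos + i < spaces.length by omega),
            List.getD_eq_getElem spaces 0 (show pos + i < spaces.length by omega)]
      have hmem : ∀ x ∈ seg, x < j * lnth := by
        intro x hx
        obtain ⟨i, hxi⟩ := List.mem_iff_getElem?.mp hx
        have hiL : i < seg.length := (List.getElem?_eq_some_iff.mp hxi).1
        rw [hlen] at hiL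
        rw [hgetD i hiL] at hxi
        have hval : spaces.getD (pos + i) 0 = x := Option.some.inj hxi
        rw [← hval]
        exact hk2 (pos + i) (by omega) (by omega) (by omega)
      have hskip := pv_foldl_skip lnth j seg ans last hmem
      -- the value of `last` after the skip equals B's last1
      have hlast : seg.getLastD last = (if k > pos then spaces.getD (k - 1) 0 else last) := by
        by_cases hkpos : k > pos
        · rw [if_pos hkpos, List.getLastD_eq_getLast?, List.getLast?_eq_getElem?, hlen,
              hgetD (k - pos - 1) (by omega), Option.getD_some]
          congr 1
          omega
        · rw [if_neg hkpos]
          have hnil : seg = [] := List.length_eq_zero_iff.mp (by omega)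
          rw [hnil]
          rfl
      -- decompose the suffix: skipped segment ++ rest
      have hdd : (spaces.drop pos).drop (k - pos) = spaces.drop k := by
        rw [List.drop_drop]; congr 1; omega
      have hdecomp : spaces.drop pos = seg ++ spaces.drop k := by
        rw [hseg, ← hdd]
        exact (List.take_append_drop (k - pos) (spaces.drop pos)).symm
      by_cases hkl : k = spaces.length
      · rw [if_pos hkl, hdecomp, List.foldl_append, hskip, hlast, hkl, List.drop_length]
        rfl
      · rw [if_neg hkl]
        have hklt : k < spaces.length := by omega
        have hdk : spaces.drop k = spaces[k] :: spaces.drop (k + 1) :=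
          List.drop_eq_getElem_cons hklt
        have hstep : pvStep lnth (ans, seg.getLastD last, j) spaces[k]
            = (if ans.getLast? != some (seg.getLastD last) then ans ++ [seg.getLastD last] else ans,
               spaces[k], j + 1) := by
          have hge := hk3 hklt
          rw [List.getD_eq_getElem spaces 0 hklt] at hge
          simp only [pvStep]
          rw [if_pos (by omega)]
        rw [hdecomp, List.foldl_append, hskip, hdk, List.foldl_cons, hstep,
            ← ih (k + 1) _ _ _ (by omega), hlast, List.getD_eq_getElem spaces 0 hklt]
    · rw [pvCutLoop, if_neg hp, List.drop_of_length_le (by omega)]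
      rfl

-- the space-position list is strictly increasing
theorem pv_spaces_sorted (kul : String) :
    ((((PySem.List.enumerate kul.toList 0).filter (fun p => p.2 == ' ')).map (fun p => p.1)) :
      List Int).Pairwise (· < ·) := by
  apply List.Pairwise.map
  case H => exact fun a b h => h
  exact (PySem.List.pairwise_lt_enumerate kul.toList 0).filter _

theorem pvCutLoop_top (spaces : List Int) (lnth : Int) (hs : spaces.Pairwise (· < ·))
    (ans : List Int) (last j : Int) :
    pvCutLoop spaces lnth spaces.length 0 ans last j
      = spaces.foldl (pvStep lnth) (ans, last, j) := by
  rw [pvCutLoop_eq_foldl spaces lnth hs spaces.length 0 ans last j (by omega), List.drop_zero]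

-- ===== VERDICT (by name: the statement is the Claim_ definition above) =====
theorem cutintopieces_spec : Claim_equal_cutintopieces := by
  intro kul lnth _ _
  unfold Spec_cutintopieces
  simp only [cutintopieces, cutintopieces_alt]
  rw [cutintopieces_fold_eq, pvCutLoop_top _ lnth (pv_spaces_sorted kul)]
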